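-- pv_equiv track=rewrite | github.com/MaelBrocher/AdventOfCode2021 | Day9/code_day_9.py | part2
-- ===== SOURCE A (Python) =====
-- from collections import Counter
--
-- def zoomba(data,x,y):
--     downhill = None
--     for dx, dy in zip([x,x,x+1,x-1],[y+1,y-1,y,y]):
--         if dx in range(len(data)) and dy in range(len(data[0])):
--             if data[x][y] > data[dx][dy]:
--                 downhill = (dx, dy)
--     if downhill is None:
--         return (x, y)
--     return zoomba(data,*downhill)
--
-- def part2(data):
--     basins = []
--     for x in range(len(data)):
--         for y in range(len(data[0])):
--             if data[x][y] != 9: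
--                 basins.append(zoomba(data, x, y))
--     ret = 1
--     for b, common in Counter(basins).most_common(3):
--         ret *= common
--     return ret
-- ===== SOURCE B (Python) =====
-- from collections import Counter
--
-- def part2(data):
--     R = len(data)
--     C = len(data[0]) if data else 0
--     # process cells from lowest to highest: the downhill neighbour's sink is already known
--     sink = {}
--     for h, x, y in sorted(((data[x][y], x, y) for x in range(R) for y in range(C)),
--                           key=lambda t: t[0]):
--         d = None
--         for dx, dy in ((x, y + 1), (x, y - 1), (x + 1, y), (x - 1, y)):
--             if 0 <= dx < R and 0 <= dy < C and data[dx][dy] < h: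
--                 d = (dx, dy)
--         sink[(x, y)] = (x, y) if d is None else sink[d]
--     counts = Counter(sink[(x, y)] for x in range(R) for y in range(C) if data[x][y] != 9)
--     ret = 1
--     for c in sorted(counts.values(), reverse=True)[:3]:
--         ret *= c
--     return ret
-- ===== Notes on version B (the rewrite author's own statement) =====
-- stated objective: faster
-- what changed: Replaces the per-cell recursive downhill walk (zoomba) by a single pass over the cells sorted in ascending height, memoizing each cell's sink via one dict lookup of its already-processed downhill neighbour, and multiplies the top-3 basin sizes from the sorted count values.
import Mathlib
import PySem

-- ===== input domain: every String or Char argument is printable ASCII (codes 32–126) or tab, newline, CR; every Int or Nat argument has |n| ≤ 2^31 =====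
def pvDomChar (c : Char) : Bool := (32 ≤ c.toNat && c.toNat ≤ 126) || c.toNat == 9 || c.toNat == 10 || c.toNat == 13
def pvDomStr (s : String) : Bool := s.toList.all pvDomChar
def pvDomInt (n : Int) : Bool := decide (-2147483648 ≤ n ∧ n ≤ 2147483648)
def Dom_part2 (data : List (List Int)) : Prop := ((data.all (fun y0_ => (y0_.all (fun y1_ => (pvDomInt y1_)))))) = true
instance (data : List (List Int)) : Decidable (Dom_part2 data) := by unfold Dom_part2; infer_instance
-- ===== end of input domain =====

-- B replaces A's per-cell recursive downhill walk by one pass over the cells in ascending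
-- height order with a memo table (each cell's sink is looked up from its already-computed
-- downhill neighbour), turning O(cells · walk length) into O(cells · log cells).

-- data[x][y], total stand-in: exact whenever the index pair is in range — the only accesses Pre_ admits
def pvAt (data : List (List Int)) (x y : Int) : Int :=
  PySem.List.pyGetD (PySem.List.pyGetD data x []) y 0

-- ===== PORT A =====
-- the for-loop of zoomba: last strictly-lower in-range neighbour of (x,y) wins
def zoombaStep (data : List (List Int)) (x y : Int) : Option (Int × Int) :=
  [(x, y + 1), (x, y - 1), (x + 1, y), (x - 1, y)].foldl
    (fun downhill p =>
      if 0 ≤ p.1 ∧ p.1 < (data.length : Int) ∧ 0 ≤ p.2 ∧ p.2 < ((data.headD []).length : Int) ∧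
          pvAt data x y > pvAt data p.1 p.2
      then some p else downhill) none

-- zoomba; fueled for termination only — on admitted inputs the fuel part2 passes never runs out
def zoombaFuel (data : List (List Int)) : Nat → Int → Int → Int × Int
  | 0, x, y => (x, y)
  | n + 1, x, y =>
    match zoombaStep data x y with
    | none => (x, y)
    | some p => zoombaFuel data n p.1 p.2

def part2 (data : List (List Int)) : Int :=
  let F := data.length * (data.headD []).length + 1
  let basins : List (Int × Int) :=
    (PySem.List.pyRange 0 (data.length : Int) 1).foldl (fun acc x =>
      (PySem.List.pyRange 0 ((data.headD []).length : Int) 1).foldl (fun acc y =>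
        if pvAt data x y ≠ 9 then acc ++ [zoombaFuel data F x y] else acc) acc) []
  -- Counter(basins).most_common(3) = heapq.nlargest(3, items, key=count) = sorted(items, key=count, reverse=True)[:3]
  ((PySem.List.sorted (PySem.Dict.counter basins).items (fun p => p.2) true).take 3).foldl
    (fun ret p => ret * p.2) 1

-- ===== PORT B =====
-- B's inner loop: last strictly-lower (than h) in-range neighbour of (x,y)
def pvNbr (data : List (List Int)) (R C x y h : Int) : Option (Int × Int) :=
  [(x, y + 1), (x, y - 1), (x + 1, y), (x - 1, y)].foldl
    (fun d p =>
      if 0 ≤ p.1 ∧ p.1 < R ∧ 0 ≤ p.2 ∧ p.2 < C ∧ pvAt data p.1 p.2 < h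
      then some p else d) none

-- the (data[x][y], x, y) triples, row-major
def pvCells (data : List (List Int)) : List (Int × Int × Int) :=
  (PySem.List.pyRange 0 (data.length : Int) 1).flatMap (fun x =>
    (PySem.List.pyRange 0 ((data.headD []).length : Int) 1).map (fun y => (pvAt data x y, x, y)))

-- sorted(..., key=lambda t: t[0])
def pvOrder (data : List (List Int)) : List (Int × Int × Int) :=
  PySem.List.sorted (pvCells data) (fun t => t.1) false

-- loop body: sink[(x,y)] = (x,y) if d is None else sink[d]  (d, strictly lower, was processed earlier,
-- so the lookup's default is dead code on admitted inputs)
def pvSinkStep (data : List (List Int)) (R C : Int)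
    (s : PySem.Dict (Int × Int) (Int × Int)) (t : Int × Int × Int) :
    PySem.Dict (Int × Int) (Int × Int) :=
  match pvNbr data R C t.2.1 t.2.2 t.1 with
  | none => s.insert (t.2.1, t.2.2) (t.2.1, t.2.2)
  | some p => s.insert (t.2.1, t.2.2) ((s.get? p).getD (t.2.1, t.2.2))

def pvSinks (data : List (List Int)) : PySem.Dict (Int × Int) (Int × Int) :=
  (pvOrder data).foldl (pvSinkStep data (data.length : Int) ((data.headD []).length : Int))
    PySem.Dict.empty

def part2_alt (data : List (List Int)) : Int :=
  let sink := pvSinks data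
  let counts := PySem.Dict.counter
    ((PySem.List.pyRange 0 (data.length : Int) 1).flatMap (fun x =>
      ((PySem.List.pyRange 0 ((data.headD []).length : Int) 1).filter
          (fun y => decide (pvAt data x y ≠ 9))).map
        (fun y => (sink.get? (x, y)).getD (x, y))))
  ((PySem.List.sorted counts.values (fun v => v) true).take 3).foldl (fun r c => r * c) 1

-- ===== PRECONDITION & SPEC =====
-- Python A raises IndexError exactly when some row is shorter than row 0 (part2 reads every
-- column index below len(data[0]) of every row); Pre_ admits everything else.
def Pre_part2 (data : List (List Int)) : Prop :=
  ∀ row ∈ data, (data.headD []).length ≤ row.length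
instance (data : List (List Int)) : Decidable (Pre_part2 data) := by
  unfold Pre_part2; infer_instance
def pvWitness_part2 : List (List Int) := [[1, 2], [3, 9]]

def Spec_part2 (data : List (List Int)) (out : Int) : Prop := out = part2_alt data
instance (data : List (List Int)) (out : Int) : Decidable (Spec_part2 data out) := by
  unfold Spec_part2; infer_instance

-- ===== CLAIM (what is proved, stated in full; the proofs are below) =====
def Claim_equal_part2 : Prop :=
  ∀ (data : List (List Int)), Dom_part2 data → Pre_part2 data → Spec_part2 data (part2 data)

-- ===== LEMMAS AND PROOFS =====

def pvValid (data : List (List Int)) (x y : Int) : Prop :=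
  0 ≤ x ∧ x < (data.length : Int) ∧ 0 ≤ y ∧ y < ((data.headD []).length : Int)

-- measure: number of cells strictly lower than (x,y)
def pvM (data : List (List Int)) (x y : Int) : Nat :=
  ((Finset.range data.length ×ˢ Finset.range (data.headD []).length).filter
    (fun c => pvAt data (c.1 : Int) (c.2 : Int) < pvAt data x y)).card

-- the canonical sink of a cell
def pvCan (data : List (List Int)) (x y : Int) : Int × Int :=
  zoombaFuel data (pvM data x y + 1) x y

lemma pv_foldl_lastSome {α : Type} (P : α → Prop) [DecidablePred P] :
    ∀ (l : List α) (acc : Option α) (q : α),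
      l.foldl (fun d p => if P p then some p else d) acc = some q →
      (P q ∧ q ∈ l) ∨ acc = some q := by
  intro l
  induction l with
  | nil => intro acc q h; exact Or.inr h
  | cons a t ih =>
    intro acc q h
    rw [List.foldl_cons] at h
    rcases ih _ q h with ⟨hP, hm⟩ | hacc
    · exact Or.inl ⟨hP, List.mem_cons_of_mem _ hm⟩
    · by_cases hPa : P a
      · rw [if_pos hPa] at hacc
        cases hacc; exact Or.inl ⟨hPa, List.mem_cons_self⟩
      · rw [if_neg hPa] at hacc; exact Or.inr hacc

lemma pv_step_lower {data : List (List Int)} {x y : Int} {d : Int × Int}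
    (h : zoombaStep data x y = some d) :
    pvValid data d.1 d.2 ∧ pvAt data d.1 d.2 < pvAt data x y := by
  unfold zoombaStep at h
  rcases pv_foldl_lastSome
      (fun p : Int × Int =>
        0 ≤ p.1 ∧ p.1 < (data.length : Int) ∧ 0 ≤ p.2 ∧ p.2 < ((data.headD []).length : Int) ∧
          pvAt data x y > pvAt data p.1 p.2) _ _ _ h with ⟨hP, _⟩ | hnone
  · exact ⟨⟨hP.1, hP.2.1, hP.2.2.1, hP.2.2.2.1⟩, hP.2.2.2.2⟩
  · cases hnone

lemma pvM_lt {data : List (List Int)} {x y : Int} {d : Int × Int}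
    (h : zoombaStep data x y = some d) : pvM data d.1 d.2 < pvM data x y := by
  obtain ⟨⟨h1, h2, h3, h4⟩, hlt⟩ := pv_step_lower h
  apply Finset.card_lt_card
  rw [Finset.ssubset_iff_of_subset]
  · refine ⟨(d.1.toNat, d.2.toNat), ?_, ?_⟩
    · simp only [Finset.mem_filter, Finset.mem_product, Finset.mem_range]
      refine ⟨⟨by omega, by omega⟩, ?_⟩
      rw [Int.toNat_of_nonneg h1, Int.toNat_of_nonneg h3]; exact hlt
    · simp only [Finset.mem_filter, Finset.mem_product, Finset.mem_range, not_and, and_imp]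
      intro _ _
      rw [Int.toNat_of_nonneg h1, Int.toNat_of_nonneg h3]; exact lt_irrefl _
  · intro c hc
    simp only [Finset.mem_filter] at hc ⊢
    exact ⟨hc.1, lt_trans hc.2 hlt⟩

lemma zoombaFuel_mono (data : List (List Int)) :
    ∀ (n : Nat) {m : Nat} {x y : Int}, pvM data x y < n → pvM data x y < m →
      zoombaFuel data n x y = zoombaFuel data m x y := by
  intro n
  induction n with
  | zero => intro m x y hn _; omega
  | succ n ih =>
    intro m x y hn hm
    cases m with
    | zero => omega
    | succ m =>
      show (match zoombaStep data x y with
            | none => (x, y)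
            | some p => zoombaFuel data n p.1 p.2) =
           (match zoombaStep data x y with
            | none => (x, y)
            | some p => zoombaFuel data m p.1 p.2)
      cases hstep : zoombaStep data x y with
      | none => rfl
      | some d =>
        have hd := pvM_lt hstep
        exact ih (by omega) (by omega)

lemma pvCan_eq (data : List (List Int)) (x y : Int) :
    pvCan data x y =
      match zoombaStep data x y with
      | none => (x, y)
      | some d => pvCan data d.1 d.2 := by
  unfold pvCan
  show (match zoombaStep data x y with
        | none => (x, y)
        | some p => zoombaFuel data (pvM data x y) p.1 p.2) = _
  cases hstep : zoombaStep data x y with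
  | none => rfl
  | some d => exact zoombaFuel_mono data _ (pvM_lt hstep) (Nat.lt_succ_self _)

lemma pv_mem_cells {data : List (List Int)} {t : Int × Int × Int} :
    t ∈ pvCells data ↔ ∃ x y, pvValid data x y ∧ t = (pvAt data x y, x, y) := by
  unfold pvCells pvValid
  simp only [List.mem_flatMap, List.mem_map, PySem.List.mem_pyRange_one]
  constructor
  · rintro ⟨x, ⟨hx0, hx1⟩, y, ⟨hy0, hy1⟩, rfl⟩
    exact ⟨x, y, ⟨hx0, hx1, hy0, hy1⟩, rfl⟩
  · rintro ⟨x, y, ⟨hx0, hx1, hy0, hy1⟩, rfl⟩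
    exact ⟨x, ⟨hx0, hx1⟩, y, ⟨hy0, hy1⟩, rfl⟩

lemma pv_mem_order {data : List (List Int)} {t : Int × Int × Int} :
    t ∈ pvOrder data ↔ t ∈ pvCells data := by
  unfold pvOrder
  exact PySem.List.mem_sorted (xs := pvCells data) (key := fun t => t.1) (rev := false) t

-- B's neighbour choice at the triple of (x,y) is A's zoomba step
lemma pvNbr_eq_step (data : List (List Int)) (x y : Int) :
    pvNbr data (data.length : Int) ((data.headD []).length : Int) x y (pvAt data x y) =
      zoombaStep data x y := rfl

-- the invariant of B's fold: a processed cell's memo entry is its canonical sink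
lemma pv_fold_inv (data : List (List Int)) :
    ∀ (l pfx : List (Int × Int × Int)) (s : PySem.Dict (Int × Int) (Int × Int)),
      pvOrder data = pfx ++ l →
      (∀ x y : Int, (pvAt data x y, x, y) ∈ pfx → s.get? (x, y) = some (pvCan data x y)) →
      ∀ x y : Int, (pvAt data x y, x, y) ∈ pvOrder data →
        ((l.foldl (pvSinkStep data (data.length : Int) ((data.headD []).length : Int)) s).get?
          (x, y)) = some (pvCan data x y) := by
  intro l
  induction l with
  | nil =>
    intro pfx s horder hs x y hmem
    rw [List.append_nil] at horder
    rw [List.foldl_nil]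
    exact hs x y (horder ▸ hmem)
  | cons t l' ih =>
    intro pfx s horder hs x y hmem
    -- t is a cell triple
    have ht : t ∈ pvOrder data := by rw [horder]; exact List.mem_append_right _ List.mem_cons_self
    obtain ⟨x0, y0, hv0, rfl⟩ := pv_mem_cells.mp (pv_mem_order.mp ht)
    -- the value inserted for t is pvCan
    have hval : pvSinkStep data (data.length : Int) ((data.headD []).length : Int) s
        (pvAt data x0 y0, x0, y0) = s.insert (x0, y0) (pvCan data x0 y0) := by
      unfold pvSinkStep
      simp only []
      rw [pvNbr_eq_step]
      cases hstep : zoombaStep data x0 y0 with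
      | none => rw [pvCan_eq data x0 y0, hstep]
      | some d =>
        -- d's triple was processed earlier
        have hcan : pvCan data x0 y0 = pvCan data d.1 d.2 := by
          rw [pvCan_eq data x0 y0, hstep]
        have hdmem : (pvAt data d.1 d.2, d.1, d.2) ∈ pfx := by
          obtain ⟨hvd, hlow⟩ := pv_step_lower hstep
          have hd_ord : (pvAt data d.1 d.2, d.1, d.2) ∈ pvOrder data :=
            pv_mem_order.mpr (pv_mem_cells.mpr ⟨d.1, d.2, hvd, rfl⟩)
          rw [horder] at hd_ord
          rcases List.mem_append.mp hd_ord with h | h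
          · exact h
          · exfalso
            have hpw : (pvOrder data).Pairwise (fun a b => a.1 ≤ b.1) :=
              PySem.List.sorted_pairwise (xs := pvCells data) (key := fun t => t.1)
            rw [horder] at hpw
            have hpw2 := (List.pairwise_append.mp hpw).2.1
            rcases List.mem_cons.mp h with h' | h'
            · have : pvAt data d.1 d.2 = pvAt data x0 y0 := congrArg Prod.fst h'
              omega
            · have := (List.pairwise_cons.mp hpw2).1 _ h'
              simp only [] at this
              omega
        show s.insert (x0, y0) ((s.get? (d.1, d.2)).getD (x0, y0)) =
          s.insert (x0, y0) (pvCan data x0 y0)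
        rw [hs d.1 d.2 hdmem, hcan]
        rfl
    rw [List.foldl_cons, hval]
    -- apply the IH with the longer prefix
    refine ih (pfx ++ [(pvAt data x0 y0, x0, y0)]) _ (by rw [horder, List.append_assoc]; rfl)
      ?_ x y hmem
    intro x' y' hmem'
    rcases List.mem_append.mp hmem' with h' | h'
    · by_cases hxy : (x', y') = (x0, y0)
      · have h1 : x' = x0 := congrArg Prod.fst hxy
        have h2 : y' = y0 := congrArg Prod.snd hxy
        subst h1; subst h2
        rw [PySem.Dict.get?_insert_self]
      · rw [PySem.Dict.get?_insert_of_ne _ _ hxy]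
        exact hs x' y' h'
    · rcases List.mem_singleton.mp h' with h''
      have h1 : x' = x0 := congrArg (fun t : Int × Int × Int => t.2.1) h''
      have h2 : y' = y0 := congrArg (fun t : Int × Int × Int => t.2.2) h''
      subst h1; subst h2
      rw [PySem.Dict.get?_insert_self]

lemma pvM_lt_F (data : List (List Int)) (x y : Int) :
    pvM data x y < data.length * (data.headD []).length + 1 := by
  have h := Finset.card_filter_le
    (Finset.range data.length ×ˢ Finset.range (data.headD []).length)
    (fun c => pvAt data (c.1 : Int) (c.2 : Int) < pvAt data x y)
  rw [Finset.card_product, Finset.card_range, Finset.card_range] at h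
  unfold pvM; omega

lemma pvSinks_get (data : List (List Int)) (x y : Int) (hv : pvValid data x y) :
    (pvSinks data).get? (x, y) = some (pvCan data x y) := by
  unfold pvSinks
  exact pv_fold_inv data (pvOrder data) [] PySem.Dict.empty rfl (by intro _ _ h; cases h) x y
    (pv_mem_order.mpr (pv_mem_cells.mpr ⟨x, y, hv, rfl⟩))

-- the two row-major sink lists coincide
lemma pv_lists_eq (data : List (List Int)) :
    (PySem.List.pyRange 0 (data.length : Int) 1).flatMap (fun x =>
      ((PySem.List.pyRange 0 ((data.headD []).length : Int) 1).filter
          (fun y => decide (pvAt data x y ≠ 9))).map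
        (fun y => zoombaFuel data (data.length * (data.headD []).length + 1) x y)) =
    (PySem.List.pyRange 0 (data.length : Int) 1).flatMap (fun x =>
      ((PySem.List.pyRange 0 ((data.headD []).length : Int) 1).filter
          (fun y => decide (pvAt data x y ≠ 9))).map
        (fun y => ((pvSinks data).get? (x, y)).getD (x, y))) := by
  refine List.flatMap_congr ?_
  intro x hx
  apply List.map_congr_left
  intro y hy
  have hx' := PySem.List.mem_pyRange_one.mp hx
  have hy' := PySem.List.mem_pyRange_one.mp (List.mem_of_mem_filter hy)
  have hv : pvValid data x y := ⟨hx'.1, hx'.2, hy'.1, hy'.2⟩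
  rw [pvSinks_get data x y hv]
  show _ = pvCan data x y
  exact zoombaFuel_mono data _ (pvM_lt_F data x y) (Nat.lt_succ_self _)

-- a common multiset sorted descending is one list
lemma pv_sorted_snd (K : PySem.Dict (Int × Int) Int) :
    (PySem.List.sorted K.items (fun p => p.2) true).map (fun p => p.2) =
      PySem.List.sorted (K.items.map (fun p => p.2)) (fun v => v) true := by
  apply PySem.List.eq_of_perm_of_pairwise_le_of_injective (key := fun v : Int => -v)
    (fun a b h => by simpa using h)
  · exact ((PySem.List.sorted_perm (xs := K.items) (key := fun p => p.2) (rev := true)).map _).trans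
      ((PySem.List.sorted_perm (xs := K.items.map (fun p => p.2)) (key := fun v => v) (rev := true)).symm)
  · have h := PySem.List.sorted_pairwise_rev (xs := K.items) (key := fun p : (Int × Int) × Int => p.2)
    exact (List.pairwise_map).mpr (h.imp (fun hab => by simpa using hab))
  · have h := PySem.List.sorted_pairwise_rev (xs := K.items.map (fun p => p.2)) (key := fun v : Int => v)
    exact h.imp (fun hab => by simpa using hab)

lemma pv_main (data : List (List Int)) : part2 data = part2_alt data := by
  unfold part2 part2_alt
  simp only [PySem.List.foldl_append_ite, PySem.List.foldl_append_eq_flatMap, List.nil_append]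
  rw [pv_lists_eq]
  -- same counter on both sides; reduce A's product over pairs to B's product over counts
  rw [← List.foldl_map (f := fun p : (Int × Int) × Int => p.2) (g := fun (r c : Int) => r * c)]
  rw [List.map_take, pv_sorted_snd]
  rfl

-- ===== VERDICT (by name: the statement is the Claim_ definition above) =====
theorem part2_spec : Claim_equal_part2 := by
  intro data _ _
  unfold Spec_part2
  exact pv_main data
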